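-- pv_equiv track=rewrite | github.com/petersigsgaard-star/garmin-to-notion | src/garmin_to_notion/formatters.py | format_training_message
-- ===== SOURCE A (Python) =====
-- def format_training_message(message: str) -> str:
--     """Map a Garmin training effect message prefix to a readable label."""
--     messages = {
--         "NO_": "No Benefit",
--         "MINOR_": "Some Benefit",
--         "RECOVERY_": "Recovery",
--         "MAINTAINING_": "Maintaining",
--         "IMPROVING_": "Improving",
--         "IMPACTING_": "Impacting",
--         "HIGHLY_": "Highly Impacting",
--         "OVERREACHING_": "Overreaching",
--     }
--     for prefix, label in messages.items():
--         if message.startswith(prefix):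
--             return label
--     return message
-- ===== SOURCE B (Python) =====
-- def format_training_message(message: str) -> str:
--     """Map a Garmin training effect message prefix to a readable label."""
--     messages = {
--         "NO_": "No Benefit",
--         "MINOR_": "Some Benefit",
--         "RECOVERY_": "Recovery",
--         "MAINTAINING_": "Maintaining",
--         "IMPROVING_": "Improving",
--         "IMPACTING_": "Impacting",
--         "HIGHLY_": "Highly Impacting",
--         "OVERREACHING_": "Overreaching",
--     }
--     prefix, sep, _rest = message.partition("_")
--     if sep:
--         return messages.get(prefix + sep, message)
--     return message
-- ===== Notes on version B (the rewrite author's own statement) =====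
-- stated objective: idiomatic
-- what changed: Replaces the linear startswith scan over the eight dict entries by a single hash lookup keyed on the leading token reconstructed via message.partition('_').
import Mathlib
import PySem

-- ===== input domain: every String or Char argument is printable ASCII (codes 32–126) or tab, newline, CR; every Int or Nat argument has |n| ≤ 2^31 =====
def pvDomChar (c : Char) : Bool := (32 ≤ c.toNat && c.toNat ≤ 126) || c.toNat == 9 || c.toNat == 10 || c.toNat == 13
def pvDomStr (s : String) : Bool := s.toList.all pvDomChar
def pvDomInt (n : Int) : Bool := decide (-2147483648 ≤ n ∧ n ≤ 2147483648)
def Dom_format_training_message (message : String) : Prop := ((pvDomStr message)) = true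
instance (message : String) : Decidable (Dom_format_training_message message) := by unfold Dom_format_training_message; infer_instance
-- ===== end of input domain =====

-- B changes the algorithm only: one partition + one dict lookup instead of a startswith scan (same values everywhere).

-- ===== PORT A =====
-- the dict literal 'messages'
def pvMessagesA : PySem.Dict String String := PySem.Dict.ofList
  [("NO_", "No Benefit"), ("MINOR_", "Some Benefit"), ("RECOVERY_", "Recovery"),
   ("MAINTAINING_", "Maintaining"), ("IMPROVING_", "Improving"), ("IMPACTING_", "Impacting"),
   ("HIGHLY_", "Highly Impacting"), ("OVERREACHING_", "Overreaching")]

-- 'for prefix, label in messages.items(): if message.startswith(prefix): return label' / 'return message'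
def pvScanA (message : String) : List (String × String) → String
  | [] => message
  | (p, l) :: rest => if PySem.Str.startswith message p then l else pvScanA message rest

def format_training_message (message : String) : String :=
  pvScanA message pvMessagesA.items

-- ===== PORT B =====
def pvMessagesB : PySem.Dict String String := PySem.Dict.ofList
  [("NO_", "No Benefit"), ("MINOR_", "Some Benefit"), ("RECOVERY_", "Recovery"),
   ("MAINTAINING_", "Maintaining"), ("IMPROVING_", "Improving"), ("IMPACTING_", "Impacting"),
   ("HIGHLY_", "Highly Impacting"), ("OVERREACHING_", "Overreaching")]

-- message.partition("_") ported by hand (exact for the one-character separator "_"):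
-- prefix = the chars before the first '_' (takeWhile), sep is non-empty iff '_' occurs in message.
def format_training_message_alt (message : String) : String :=
  let cs := message.toList
  if '_' ∈ cs then
    pvMessagesB.getD (String.ofList (cs.takeWhile (· ≠ '_') ++ ['_'])) message
  else message

-- ===== PRECONDITION & SPEC =====
def Spec_format_training_message (message : String) (out : String) : Prop := out = format_training_message_alt message
instance (message : String) (out : String) : Decidable (Spec_format_training_message message out) := by unfold Spec_format_training_message; infer_instance

-- ===== CLAIM (what is proved, stated in full; the proofs are below) =====
def Claim_equal_format_training_message : Prop := ∀ (message : String), Dom_format_training_message message → Spec_format_training_message message (format_training_message message)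

-- ===== LEMMAS AND PROOFS =====

-- String == against ofList moved to the list side
theorem pv_beq_ofList (l : List Char) (s : String) :
    ((s == String.ofList l) : Bool) = (s.toList == l) := by
  rw [Bool.eq_iff_iff]
  simp only [beq_iff_eq]
  constructor
  · intro h; subst h; exact String.toList_ofList
  · intro h; apply String.toList_inj.mp; rw [String.toList_ofList]; exact h

-- a prefix of the shape k ++ ['_'] with no earlier '_' is exactly the token before the first '_'
theorem pv_prefix_iff (s : List Char) : ∀ (k : List Char), '_' ∉ k →
    ((k ++ ['_'] <+: s) ↔ ('_' ∈ s ∧ s.takeWhile (· ≠ '_') = k)) := by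
  induction s with
  | nil => intro k _; simp
  | cons c s ih =>
    intro k hk
    by_cases hc : c = '_'
    · subst hc
      cases k with
      | nil => simp
      | cons d k' =>
        have hd : d ≠ '_' := fun h => hk (h ▸ List.mem_cons_self)
        simp [List.cons_prefix_cons, hd]
    · have hc' : ¬'_' = c := fun h => hc h.symm
      have hpos : List.takeWhile (fun x => decide (x ≠ '_')) (c :: s)
          = c :: List.takeWhile (fun x => decide (x ≠ '_')) s := by
        apply List.takeWhile_cons_of_pos; simp [hc]
      cases k with
      | nil =>
        simp [List.cons_prefix_cons, hc']
        exact fun _ => hc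
      | cons d k' =>
        have hk' : '_' ∉ k' := fun h => hk (List.mem_cons_of_mem _ h)
        rw [show (d :: k') ++ ['_'] = d :: (k' ++ ['_']) from rfl, List.cons_prefix_cons,
          hpos, ih k' hk']
        simp only [List.mem_cons, hc', false_or]
        constructor
        · rintro ⟨rfl, hm, ht⟩; exact ⟨hm, by rw [ht]⟩
        · rintro ⟨hm, ht⟩
          obtain ⟨he, ht⟩ := List.cons_eq_cons.mp ht
          exact ⟨he.symm, hm, ht⟩

-- when '_' occurs in the message, startswith(k ++ '_') is an equality test on the leading token
theorem pv_startswith_key (m : String) (k : List Char) (hk : '_' ∉ k) (hu : '_' ∈ m.toList) :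
    PySem.Str.startswith m (String.ofList (k ++ ['_']))
      = ((String.ofList (k ++ ['_']) : String).toList == m.toList.takeWhile (· ≠ '_') ++ ['_']) := by
  rw [Bool.eq_iff_iff]
  simp only [PySem.Str.startswith_eq, PySem.Chars.startswith_iff, String.toList_ofList, beq_iff_eq]
  rw [pv_prefix_iff m.toList k hk]
  constructor
  · rintro ⟨_, ht⟩; rw [ht]
  · intro h
    have : k = m.toList.takeWhile (· ≠ '_') := by
      have := List.append_inj_left' h rfl
      exact this
    exact ⟨hu, this.symm⟩

-- the scan over the items equals the dict lookup on the reconstructed token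
theorem pv_scan_eq_lookup (m : String) (t : List Char) :
    ∀ (items : List (String × String)),
    (∀ kv ∈ items, PySem.Str.startswith m kv.1 = (kv.1.toList == t ++ ['_'])) →
    pvScanA m items = (PySem.Dict.mk items).getD (String.ofList (t ++ ['_'])) m := by
  intro items
  induction items with
  | nil => intro _; simp [pvScanA, PySem.Dict.getD, PySem.Dict.get?]
  | cons kv rest ih =>
    intro h
    obtain ⟨k, v⟩ := kv
    have h1 := h (k, v) List.mem_cons_self
    have hcond : (k == String.ofList (t ++ ['_'])) = PySem.Str.startswith m k := by
      rw [pv_beq_ofList, h1]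
    have ihr := ih (fun kv hkv => h kv (List.mem_cons_of_mem _ hkv))
    simp only [pvScanA, PySem.Dict.getD, PySem.Dict.get?_mk_cons, hcond] at *
    by_cases hs : PySem.Str.startswith m k = true
    · rw [if_pos hs, if_pos hs]; rfl
    · rw [Bool.not_eq_true] at hs
      rw [hs]
      simp only [if_neg Bool.false_ne_true]
      exact ihr

-- if no entry's prefix matches, the scan falls through to message
theorem pv_scan_false (m : String) :
    ∀ (items : List (String × String)),
    (∀ kv ∈ items, PySem.Str.startswith m kv.1 = false) →
    pvScanA m items = m := by
  intro items
  induction items with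
  | nil => intro _; rfl
  | cons kv rest ih =>
    intro h
    obtain ⟨k, v⟩ := kv
    simp only [pvScanA, h (k, v) List.mem_cons_self, if_neg Bool.false_ne_true]
    exact ih fun kv hkv => h kv (List.mem_cons_of_mem _ hkv)

-- the items list of the table, as a literal
theorem pv_itemsA : pvMessagesA.items =
    [("NO_", "No Benefit"), ("MINOR_", "Some Benefit"), ("RECOVERY_", "Recovery"),
     ("MAINTAINING_", "Maintaining"), ("IMPROVING_", "Improving"), ("IMPACTING_", "Impacting"),
     ("HIGHLY_", "Highly Impacting"), ("OVERREACHING_", "Overreaching")] := by decide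

-- every key of the table is <token without '_'> ++ "_"
theorem pv_keys_shape : ∀ kv ∈ pvMessagesA.items,
    ∃ k : List Char, kv.1 = String.ofList (k ++ ['_']) ∧ '_' ∉ k := by
  rw [pv_itemsA]
  intro kv hkv
  simp only [List.mem_cons, List.not_mem_nil, or_false] at hkv
  rcases hkv with rfl | rfl | rfl | rfl | rfl | rfl | rfl | rfl
  · exact ⟨['N','O'], rfl, by decide⟩
  · exact ⟨['M','I','N','O','R'], rfl, by decide⟩
  · exact ⟨['R','E','C','O','V','E','R','Y'], rfl, by decide⟩
  · exact ⟨['M','A','I','N','T','A','I','N','I','N','G'], rfl, by decide⟩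
  · exact ⟨['I','M','P','R','O','V','I','N','G'], rfl, by decide⟩
  · exact ⟨['I','M','P','A','C','T','I','N','G'], rfl, by decide⟩
  · exact ⟨['H','I','G','H','L','Y'], rfl, by decide⟩
  · exact ⟨['O','V','E','R','R','E','A','C','H','I','N','G'], rfl, by decide⟩

-- ===== VERDICT (by name: the statement is the Claim_ definition above) =====
theorem format_training_message_spec : Claim_equal_format_training_message := by
  intro message _
  unfold Spec_format_training_message format_training_message format_training_message_alt
  by_cases hu : '_' ∈ message.toList
  · simp only [hu, if_pos]
    have : pvMessagesB = PySem.Dict.mk pvMessagesA.items := by decide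
    rw [this]
    apply pv_scan_eq_lookup
    intro kv hkv
    obtain ⟨k, hk1, hk2⟩ := pv_keys_shape kv hkv
    rw [hk1, pv_startswith_key message k hk2 hu]
  · simp only [hu, if_false]
    apply pv_scan_false
    intro kv hkv
    obtain ⟨k, hk1, hk2⟩ := pv_keys_shape kv hkv
    rw [Bool.eq_false_iff]
    intro hsw
    rw [hk1] at hsw
    simp only [PySem.Str.startswith_eq, PySem.Chars.startswith_iff, String.toList_ofList] at hsw
    exact hu (hsw.subset (by simp))
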